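-- pv_equiv track=rewrite | github.com/IvanKalug-QA/codewars | L2_Triple_X.py | triple_x
-- ===== SOURCE A (Python) =====
-- def triple_x(s):
--     result = []
--     st = ''
--     for i in s:
--         if i != 'x':
--             if st:
--                 result.append(st)
--             st = ''
--         elif i == 'x':
--             st += i
--     else:
--         if st: result.append(st)
--     return True if result and len(result[0]) >= 3 else False
-- ===== SOURCE B (Python) =====
-- def triple_x(s):
--     i = s.find('x')
--     return i != -1 and s[i:i+3] == 'xxx'
-- ===== Notes on version B (the rewrite author's own statement) =====
-- stated objective: faster
-- what changed: B locates the first x with str.find and checks the following three characters via one slice comparison, instead of A's accumulator loop that scans character by character building a list of all x-runs and then inspects the first one.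
import Mathlib
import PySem

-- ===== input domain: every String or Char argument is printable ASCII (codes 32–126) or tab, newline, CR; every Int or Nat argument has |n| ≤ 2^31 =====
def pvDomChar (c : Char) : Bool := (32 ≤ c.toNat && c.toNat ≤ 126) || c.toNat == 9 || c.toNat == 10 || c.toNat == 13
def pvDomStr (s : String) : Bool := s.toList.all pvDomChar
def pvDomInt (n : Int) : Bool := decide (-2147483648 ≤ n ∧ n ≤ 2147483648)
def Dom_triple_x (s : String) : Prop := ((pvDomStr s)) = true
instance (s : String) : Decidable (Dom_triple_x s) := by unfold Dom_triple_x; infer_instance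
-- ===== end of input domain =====

-- B locates the first 'x' with str.find and compares a 3-char slice, instead of A's loop collecting all x-runs (idiomatic).

-- ===== PORT A =====
-- the for-loop of A: state (result, st); the for-else appends the pending run at the end
def tripleXLoop : List Char → List (List Char) → List Char → List (List Char)
  | [], result, st => if st ≠ [] then result ++ [st] else result
  | i :: rest, result, st =>
      if i ≠ 'x' then tripleXLoop rest (if st ≠ [] then result ++ [st] else result) []
      else tripleXLoop rest result (st ++ [i])

def triple_x (s : String) : Bool :=
  match tripleXLoop s.toList [] [] with
  | [] => false
  | r :: _ => decide (3 ≤ r.length)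

-- ===== PORT B =====
def triple_x_alt (s : String) : Bool :=
  let i := PySem.Str.find s "x"
  if i = -1 then false
  else PySem.Str.slice s (some i) (some (i + 3)) == "xxx"

-- ===== PRECONDITION & SPEC =====
def Spec_triple_x (s : String) (out : Bool) : Prop := out = triple_x_alt s
instance (s : String) (out : Bool) : Decidable (Spec_triple_x s out) := by unfold Spec_triple_x; infer_instance

-- ===== CLAIM (what is proved, stated in full; the proofs are below) =====
def Claim_equal_triple_x : Prop := ∀ (s : String), Dom_triple_x s → Spec_triple_x s (triple_x s)

-- ===== LEMMAS AND PROOFS =====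

-- the first x-run of a character list
def firstRun (l : List Char) : List Char :=
  (l.dropWhile (fun c => !(c == 'x'))).takeWhile (fun c => c == 'x')

theorem firstRun_eq_nil_of_not_mem {l : List Char} (h : 'x' ∉ l) : firstRun l = [] := by
  have hd : l.dropWhile (fun c => !(c == 'x')) = [] := by
    rw [List.dropWhile_eq_nil_iff]
    intro x hx
    simp only [Bool.not_eq_eq_eq_not, Bool.not_true, beq_eq_false_iff_ne, ne_eq]
    exact fun hxx => h (hxx ▸ hx)
  simp [firstRun, hd]

theorem tripleXLoop_cons_res (l : List Char) : ∀ (r : List Char) (rs : List (List Char))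
    (st : List Char), ∃ t, tripleXLoop l (r :: rs) st = r :: t := by
  induction l with
  | nil =>
    intro r rs st
    by_cases h : st = [] <;> simp [tripleXLoop, h]
  | cons i rest ih =>
    intro r rs st
    by_cases hi : i = 'x'
    · obtain ⟨t, ht⟩ := ih r rs (st ++ [i])
      exact ⟨t, by simpa [tripleXLoop, hi] using ht⟩
    · by_cases h : st = [] <;> simpa [tripleXLoop, hi, h] using ih r _ []

theorem tripleXLoop_pending (l : List Char) : ∀ (st : List Char), st ≠ [] →
    ∃ t, tripleXLoop l [] st = (st ++ l.takeWhile (fun c => c == 'x')) :: t := by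
  induction l with
  | nil =>
    intro st hst
    exact ⟨[], by simp [tripleXLoop, hst]⟩
  | cons i rest ih =>
    intro st hst
    by_cases hi : i = 'x'
    · obtain ⟨t, ht⟩ := ih (st ++ [i]) (by simp)
      refine ⟨t, ?_⟩
      subst hi
      simp only [List.append_assoc, List.singleton_append] at ht
      simpa [tripleXLoop] using ht
    · obtain ⟨t, ht⟩ := tripleXLoop_cons_res rest st [] []
      exact ⟨t, by simp [tripleXLoop, hi, hst, ht]⟩

theorem tripleXLoop_start (l : List Char) :
    (('x' ∉ l) → tripleXLoop l [] [] = []) ∧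
    (('x' ∈ l) → ∃ t, tripleXLoop l [] [] = firstRun l :: t) := by
  induction l with
  | nil => simp [tripleXLoop]
  | cons i rest ih =>
    by_cases hi : i = 'x'
    · refine ⟨by simp [hi], fun _ => ?_⟩
      obtain ⟨t, ht⟩ := tripleXLoop_pending rest ['x'] (by simp)
      refine ⟨t, ?_⟩
      simp [tripleXLoop, hi, ht, firstRun]
    · constructor
      · intro h
        have : 'x' ∉ rest := by simp_all
        simpa [tripleXLoop, hi] using ih.1 this
      · intro h
        have hmem : 'x' ∈ rest := by
          rcases List.mem_cons.mp h with h2 | h2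
          · exact absurd h2.symm hi
          · exact h2
        obtain ⟨t, ht⟩ := ih.2 hmem
        exact ⟨t, by simpa [tripleXLoop, hi, firstRun, List.dropWhile_cons, Ne.symm hi] using ht⟩

theorem triple_x_eq_firstRun (s : String) :
    triple_x s = decide (3 ≤ (firstRun s.toList).length) := by
  by_cases h : 'x' ∈ s.toList
  · obtain ⟨t, ht⟩ := (tripleXLoop_start s.toList).2 h
    simp [triple_x, ht]
  · have h1 := (tripleXLoop_start s.toList).1 h
    simp [triple_x, h1, firstRun_eq_nil_of_not_mem h]

-- the drop at the first failing index is dropWhile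
theorem drop_eq_dropWhile (l : List Char) : ∀ (k : Nat), k < l.length →
    l[k]! = 'x' → (∀ j, j < k → l[j]! ≠ 'x') →
    l.drop k = l.dropWhile (fun c => !(c == 'x')) := by
  induction l with
  | nil => intro k hk; simp at hk
  | cons i rest ih =>
    intro k hk hkx hmin
    cases k with
    | zero =>
      simp at hkx
      simp [hkx, List.dropWhile_cons]
    | succ k =>
      have hi : i ≠ 'x' := by
        have := hmin 0 (Nat.succ_pos _)
        simpa using this
      have := ih k (by simpa using hk) (by simpa using hkx)
        (fun j hj => by simpa using hmin (j+1) (by omega))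
      simpa [List.dropWhile_cons, hi] using this

theorem take_three_iff (d : List Char) :
    (d.take 3 = ['x', 'x', 'x']) ↔ 3 ≤ (d.takeWhile (fun c => c == 'x')).length := by
  match d with
  | [] => simp
  | [a] =>
    constructor
    · intro h; simp at h
    · intro h
      by_cases ha : a = 'x' <;> simp [List.takeWhile_cons, ha] at h
  | [a, b] =>
    constructor
    · intro h; simp at h
    · intro h
      by_cases ha : a = 'x' <;> by_cases hb : b = 'x' <;>
        simp [List.takeWhile_cons, ha, hb] at h
  | a :: b :: c :: t =>
    constructor
    · intro h
      simp [List.take] at h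
      obtain ⟨ha, hb, hc⟩ := h
      simp [List.takeWhile_cons, ha, hb, hc]
    · intro h
      by_cases ha : a = 'x' <;> by_cases hb : b = 'x' <;> by_cases hc : c = 'x' <;>
        simp_all [List.take]

theorem triple_x_alt_eq_firstRun (s : String) :
    triple_x_alt s = decide (3 ≤ (firstRun s.toList).length) := by
  by_cases h : 'x' ∈ s.toList
  · have hinf : ['x'] <:+: s.toList := (List.singleton_infix_iff 'x' s.toList).mpr h
    have hne : PySem.Chars.find s.toList ['x'] ≠ -1 :=
      (PySem.Chars.find_ne_neg_one_iff _ _).mpr hinf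
    have hnn : 0 ≤ PySem.Chars.find s.toList ['x'] :=
      (PySem.Chars.find_nonneg_iff _ _).mpr hinf
    set i := PySem.Chars.find s.toList ['x'] with hi
    obtain ⟨hpre, hmin⟩ := PySem.Chars.find_spec (s := s.toList) (sub := ['x']) hnn
    have hklen : i.toNat < s.toList.length := by
      rcases hpre with ⟨u, hu⟩
      have : 0 < (s.toList.drop i.toNat).length := by
        rw [← hu]; simp
      simpa using this
    have hkx : s.toList[i.toNat]! = 'x' := by
      rcases hpre with ⟨u, hu⟩
      have h0 : (s.toList.drop i.toNat)[0]! = 'x' := by rw [← hu]; simp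
      simpa [List.getElem!_eq_getElem?_getD, hklen] using h0
    have hdrop : s.toList.drop i.toNat = s.toList.dropWhile (fun c => !(c == 'x')) := by
      apply drop_eq_dropWhile _ _ hklen hkx
      intro j hj hjx
      apply hmin j hj
      have hjlen : j < s.toList.length := by omega
      refine ⟨s.toList.drop (j+1), ?_⟩
      have hjv : s.toList[j] = 'x' := by
        rw [List.getElem!_eq_getElem?_getD, List.getElem?_eq_getElem hjlen] at hjx
        simpa using hjx
      rw [show (['x'] : List Char) ++ s.toList.drop (j+1)
            = s.toList[j] :: s.toList.drop (j+1) by simp [hjv]]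
      exact List.getElem_cons_drop hjlen
    have hslice : PySem.List.slice s.toList (some i) (some (i + 3))
        = (s.toList.drop i.toNat).take 3 := by
      rw [PySem.List.slice_toNat _ hnn (by omega)]
      congr 1
      omega
    have heq : (PySem.Str.slice s (some i) (some (i + 3)) == "xxx")
        = ((s.toList.drop i.toNat).take 3 == ['x', 'x', 'x']) := by
      rw [Bool.eq_iff_iff, beq_iff_eq, beq_iff_eq]
      constructor
      · intro hsl
        have h2 := congrArg String.toList hsl
        simpa [PySem.Str.slice, PySem.Chars.slice, hslice] using h2
      · intro hsl
        simp only [PySem.Str.slice, PySem.Chars.slice, hslice, hsl]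
    rw [Bool.eq_iff_iff]
    simp only [triple_x_alt, PySem.Str.find_eq,
      show ("x".toList) = ['x'] from rfl, ← hi, if_neg hne, heq]
    rw [hdrop]
    simp [take_three_iff, firstRun]
  · have hninf : ¬ (['x'] <:+: s.toList) := fun hc =>
      h ((List.singleton_infix_iff 'x' s.toList).mp hc)
    have hfind : PySem.Chars.find s.toList ['x'] = -1 :=
      (PySem.Chars.find_eq_neg_one_iff _ _).mpr hninf
    simp only [triple_x_alt, PySem.Str.find_eq,
      show ("x".toList) = ['x'] from rfl, hfind,
      firstRun_eq_nil_of_not_mem h]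
    simp

-- ===== VERDICT (by name: the statement is the Claim_ definition above) =====
theorem triple_x_spec : Claim_equal_triple_x := by
  intro s _
  unfold Spec_triple_x
  rw [triple_x_eq_firstRun, triple_x_alt_eq_firstRun]
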